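-- pv_equiv track=rewrite | github.com/VietTralala/123-triply-eff | src/paulis.py | index_to_pauli_string
-- ===== SOURCE A (Python) =====
-- def index_to_pauli_string(label_index, n):
--     """
--     Convert an integer index to its corresponding Pauli string label.
--
--     Parameters
--     ----------
--     label_index : int
--         Index in the range [0, 4^n).
--     n : int
--         Number of qubits.
--
--     Returns
--     -------
--     label : str
--         Pauli string label (e.g., 'XIZ').
--     """
--     idx_to_letter = ["I", "X", "Y", "Z"]
--     tmp = label_index
--     letters = [None] * n
--     for q in reversed(range(n)):
--         letters[q] = idx_to_letter[tmp % 4]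
--         tmp //= 4
--     return "".join(letters)
-- ===== SOURCE B (Python) =====
-- def index_to_pauli_string(label_index, n):
--     """Divide-and-conquer re-implementation: the n-letter string is the
--     concatenation of the strings for the high and low halves of the index,
--     obtained by one divmod split per recursion level."""
--     if n <= 0:
--         return ""
--     if n == 1:
--         return "IXYZ"[label_index % 4]
--     h = n // 2
--     hi, lo = divmod(label_index, 4 ** h)
--     return index_to_pauli_string(hi, n - h) + index_to_pauli_string(lo, h)
-- ===== Notes on version B (the rewrite author's own statement) =====
-- stated objective: alternative
-- what changed: Replaced A's linear loop that threads a running quotient (tmp //= 4) through n sequential divmod steps with a divide-and-conquer recursion: one divmod by 4**(n//2) splits the index into high/low halves and the string is the concatenation of the two recursively built halves.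
import Mathlib
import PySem

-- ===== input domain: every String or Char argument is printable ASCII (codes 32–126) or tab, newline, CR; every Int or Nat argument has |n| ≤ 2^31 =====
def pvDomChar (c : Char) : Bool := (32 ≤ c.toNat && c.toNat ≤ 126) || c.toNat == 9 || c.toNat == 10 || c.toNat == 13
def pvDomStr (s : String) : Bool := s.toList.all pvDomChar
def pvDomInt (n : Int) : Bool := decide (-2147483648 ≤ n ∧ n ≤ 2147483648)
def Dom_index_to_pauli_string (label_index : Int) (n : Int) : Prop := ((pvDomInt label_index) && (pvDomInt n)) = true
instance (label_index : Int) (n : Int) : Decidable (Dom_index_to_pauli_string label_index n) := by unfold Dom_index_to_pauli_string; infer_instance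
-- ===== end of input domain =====

-- B replaces A's sequential quotient-threading loop with a divide-and-conquer recursion (one divmod split per level); same values, no speed claim.

-- ===== PORT A =====
-- idx_to_letter = ["I", "X", "Y", "Z"]
def pvIdxToLetter : List Char := ['I', 'X', 'Y', 'Z']

-- the loop `for q in reversed(range(n)): letters[q] = idx_to_letter[tmp % 4]; tmp //= 4`:
-- k iterations remaining; the element written LAST in the loop (largest q processed first) sits at the end,
-- so each recursive step places idx_to_letter[tmp % 4] at the back and continues with tmp // 4 for the front.
-- tmp % 4 is always in [0,4) so the list index never raises; pyGetD's default is unreachable.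
def pvAuxA : Nat → Int → List Char
  | 0, _ => []
  | k+1, tmp => pvAuxA k (PySem.Int.floordiv tmp 4) ++ [PySem.List.pyGetD pvIdxToLetter (PySem.Int.mod tmp 4) 'I']

def index_to_pauli_string (label_index : Int) (n : Int) : String :=
  String.mk (pvAuxA n.toNat label_index)

-- ===== PORT B =====
-- Source B's recursion on n ≥ 1 (the `if n <= 0: return ""` guard is in the wrapper below):
-- n == 1 → single letter "IXYZ"[i % 4]; otherwise h = n // 2, (hi, lo) = divmod(i, 4**h),
-- result = recurse(hi, n-h) ++ recurse(lo, h). Recursion is on the Nat size, exact for n ≥ 1.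
def pvAuxB : Nat → Int → List Char
  | 0, _ => []
  | 1, i => [PySem.List.pyGetD "IXYZ".toList (PySem.Int.mod i 4) 'I']
  | k+2, i =>
      pvAuxB ((k+2) - (k+2)/2) (PySem.Int.floordiv i ((4:Int)^((k+2)/2)))
        ++ pvAuxB ((k+2)/2) (PySem.Int.mod i ((4:Int)^((k+2)/2)))
  termination_by k _ => k
  decreasing_by all_goals omega

def index_to_pauli_string_alt (label_index : Int) (n : Int) : String :=
  if n ≤ 0 then "" else String.mk (pvAuxB n.toNat label_index)

-- ===== PRECONDITION & SPEC =====
def Spec_index_to_pauli_string (label_index : Int) (n : Int) (out : String) : Prop := out = index_to_pauli_string_alt label_index n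
instance (label_index : Int) (n : Int) (out : String) : Decidable (Spec_index_to_pauli_string label_index n out) := by unfold Spec_index_to_pauli_string; infer_instance

-- ===== CLAIM (what is proved, stated in full; the proofs are below) =====
def Claim_equal_index_to_pauli_string : Prop := ∀ (label_index : Int) (n : Int), Dom_index_to_pauli_string label_index n → Spec_index_to_pauli_string label_index n (index_to_pauli_string label_index n)

-- ===== LEMMAS AND PROOFS =====

-- A's threaded-quotient loop computes, at position q of k, the digit tmp // 4^(k-1-q) % 4.
lemma pvAuxA_eq_map (k : ℕ) (tmp : ℤ) :
    pvAuxA k tmp = (List.range k).map (fun q =>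
      PySem.List.pyGetD pvIdxToLetter
        (PySem.Int.mod (PySem.Int.floordiv tmp ((4:Int) ^ (k - 1 - q))) 4) 'I') := by
  induction k generalizing tmp with
  | zero => simp [pvAuxA]
  | succ k ih =>
    rw [pvAuxA, ih, List.range_succ, List.map_append]
    congr 1
    · refine List.map_congr_left (fun q hq => ?_)
      have hq' : q < k := List.mem_range.mp hq
      have h1 : k + 1 - 1 - q = (k - 1 - q) + 1 := by omega
      have h2 : PySem.Int.floordiv (PySem.Int.floordiv tmp 4) ((4:Int) ^ (k - 1 - q))
          = PySem.Int.floordiv tmp ((4:Int) ^ ((k - 1 - q) + 1)) := by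
        simp only [PySem.Int.floordiv]
        rw [Int.fdiv_fdiv_eq_fdiv_mul tmp (by norm_num) (by positivity)]
        ring_nf
      rw [h1, ← h2]
    · simp [PySem.Int.floordiv, Int.fdiv_one]

-- taking the low h base-4 digits first does not change digit j < h
lemma pvModDigit (i : ℤ) (h j : ℕ) (hj : j < h) :
    PySem.Int.mod (PySem.Int.floordiv (PySem.Int.mod i ((4:Int)^h)) ((4:Int)^j)) 4
      = PySem.Int.mod (PySem.Int.floordiv i ((4:Int)^j)) 4 := by
  rw [PySem.Int.mod_eq_emod_of_pos (by positivity : (0:ℤ) < 4^h),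
      PySem.Int.floordiv_eq_ediv_of_pos (by positivity : (0:ℤ) < 4^j),
      PySem.Int.floordiv_eq_ediv_of_pos (by positivity : (0:ℤ) < 4^j),
      PySem.Int.mod_eq_emod_of_pos (by norm_num : (0:ℤ) < 4),
      PySem.Int.mod_eq_emod_of_pos (by norm_num : (0:ℤ) < 4)]
  obtain ⟨m, rfl⟩ : ∃ m, h = j + (m + 1) := ⟨h - j - 1, by omega⟩
  set t := i / 4^(j + (m + 1)) with ht
  have hrep : i % 4^(j + (m + 1)) = i + (4:ℤ)^j * (-(4^m * 4 * t)) := by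
    rw [Int.emod_def, ← ht, pow_add, pow_succ]; ring
  rw [hrep, Int.add_mul_ediv_left _ _ (by positivity : ((4:ℤ)^j) ≠ 0)]
  have hre : i / 4^j + -(4^m * 4 * t) = i / 4^j + 4 * (-(4^m * t)) := by ring
  rw [hre, Int.add_mul_emod_self_left]

-- the high digits of i are the digits of i // 4^h
lemma pvHighDigit (i : ℤ) (h m : ℕ) :
    PySem.Int.floordiv (PySem.Int.floordiv i ((4:Int)^h)) ((4:Int)^m)
      = PySem.Int.floordiv i ((4:Int)^(h + m)) := by
  simp only [PySem.Int.floordiv]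
  rw [Int.fdiv_fdiv_eq_fdiv_mul i (by positivity) (by positivity)]
  rw [pow_add]

-- B's divide-and-conquer recursion computes the same digit map as A's loop.
lemma pvAuxB_eq_map (k : ℕ) : ∀ i : ℤ,
    pvAuxB k i = (List.range k).map (fun q =>
      PySem.List.pyGetD pvIdxToLetter
        (PySem.Int.mod (PySem.Int.floordiv i ((4:Int) ^ (k - 1 - q))) 4) 'I') := by
  induction k using Nat.strong_induction_on with
  | _ k ih =>
    intro i
    match k with
    | 0 => simp [pvAuxB]
    | 1 =>
      simp [pvAuxB, PySem.Int.floordiv, Int.fdiv_one, List.range_succ]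
      rfl
    | (k+2) =>
      rw [pvAuxB, ih ((k+2) - (k+2)/2) (by omega), ih ((k+2)/2) (by omega)]
      have hsplit : List.range (k+2)
          = List.range ((k+2) - (k+2)/2) ++ (List.range ((k+2)/2)).map (((k+2) - (k+2)/2) + ·) := by
        rw [← List.range_add]; congr 1; omega
      rw [hsplit, List.map_append, List.map_map]
      congr 1
      · refine List.map_congr_left (fun q hq => ?_)
        have hq' : q < (k+2) - (k+2)/2 := List.mem_range.mp hq
        rw [pvHighDigit]
        have heq : (k+2)/2 + ((k+2) - (k+2)/2 - 1 - q) = (k+2) - 1 - q := by omega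
        rw [heq]
      · refine List.map_congr_left (fun q hq => ?_)
        have hq' : q < (k+2)/2 := List.mem_range.mp hq
        simp only [Function.comp]
        have h1 : (k+2) - 1 - ((k+2) - (k+2)/2 + q) = (k+2)/2 - 1 - q := by omega
        rw [h1, pvModDigit i ((k+2)/2) ((k+2)/2 - 1 - q) (by omega)]

theorem index_to_pauli_string_spec : Claim_equal_index_to_pauli_string := by
  intro label_index n _
  show index_to_pauli_string label_index n = index_to_pauli_string_alt label_index n
  unfold index_to_pauli_string index_to_pauli_string_alt
  rcases le_or_gt n 0 with hn | hn
  · have h1 : n.toNat = 0 := by omega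
    simp [h1, pvAuxA, hn]
    rfl
  · rw [if_neg (by omega), pvAuxA_eq_map, pvAuxB_eq_map]
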